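-- pv_equiv track=rewrite | github.com/civici/codewars-solutions | 80_s_kids_number_4_legends_of_the_hidden_temple.py | mark_spot
-- ===== SOURCE A (Python) =====
-- def mark_spot(n):
--
--     if type(n) != int or n % 2 != 1 or n < 1:
--         return "?"
--
--     maxLineLen = 2 * n - 1
--     middleLineIndex = int(n / 2) + 1
--     finalStr = ""
--
--     for i in range(1, n + 1):
--         if i > middleLineIndex:
--             i = middleLineIndex - (i - middleLineIndex)
--         outsideSpaces = (i - 1) * 2
--         firstPart = " " * outsideSpaces
--         middlePart = (maxLineLen - (outsideSpaces * 2) - 2) * " "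
--         if i == middleLineIndex:
--             finalStr += firstPart + "X"
--         else:
--             finalStr += firstPart + "X" + middlePart + "X"
--         finalStr += "\n"
--
--     return finalStr
-- ===== SOURCE B (Python) =====
-- def _row(n, r):
--     left = " " * (2 * r)
--     if 2 * r == n - 1:
--         return left + "X"
--     return left + "X" + " " * (2 * n - 3 - 4 * r) + "X"
--
--
-- def mark_spot(n):
--     if type(n) != int or n % 2 != 1 or n < 1:
--         return "?"
--     top = [_row(n, r) for r in range(n // 2 + 1)]
--     rows = top + list(reversed(top[:-1]))
--     return "".join(row + "\n" for row in rows)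
-- ===== Notes on version B (the rewrite author's own statement) =====
-- stated objective: alternative
-- what changed: B builds only the top half of the X as a list of rows and mirrors it (top + reversed(top[:-1])) instead of A's single loop over all n lines that re-folds indices past the middle back onto the top half.
import Mathlib
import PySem

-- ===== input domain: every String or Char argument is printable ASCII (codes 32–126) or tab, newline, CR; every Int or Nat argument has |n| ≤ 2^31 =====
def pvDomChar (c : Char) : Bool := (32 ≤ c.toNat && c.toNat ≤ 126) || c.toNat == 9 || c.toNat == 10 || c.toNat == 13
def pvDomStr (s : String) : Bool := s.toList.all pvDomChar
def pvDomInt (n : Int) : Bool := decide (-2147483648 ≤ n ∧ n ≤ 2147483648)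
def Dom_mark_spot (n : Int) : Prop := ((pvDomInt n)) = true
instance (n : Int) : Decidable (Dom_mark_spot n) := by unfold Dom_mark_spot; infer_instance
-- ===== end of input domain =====

-- B builds only the top half of the X and mirrors it, instead of A's single loop over
-- all n lines that folds indices past the middle back onto the top half (alternative
-- decomposition, same cost).


-- ===== PORT A =====
-- " " * z : Python string repetition (negative count gives ""); exact, shared primitive
def pvSp (z : Int) : List Char := List.replicate z.toNat ' '

def mark_spot (n : Int) : String :=
  -- type(n) != int is always False here (n : Int); Python's n % 2 is PySem.Int.mod
  if PySem.Int.mod n 2 ≠ 1 ∨ n < 1 then "?"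
  else
    let maxLineLen : Int := 2 * n - 1
    -- int(n / 2): truncating division; equals floor division since n > 0 here
    let middleLineIndex : Int := PySem.Int.floordiv n 2 + 1
    String.mk ((PySem.List.pyRange 1 (n + 1) 1).foldl (fun acc i =>
      let i' := if middleLineIndex < i then middleLineIndex - (i - middleLineIndex) else i
      let outsideSpaces := (i' - 1) * 2
      let firstPart := pvSp outsideSpaces
      let middlePart := pvSp (maxLineLen - outsideSpaces * 2 - 2)
      (if i' = middleLineIndex then acc ++ firstPart ++ ['X']
       else acc ++ firstPart ++ ['X'] ++ middlePart ++ ['X']) ++ ['\n']) [])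

-- ===== PORT B =====
-- one row of the top half, row index r (0-based)
def pvRow (n r : Int) : List Char :=
  let left := pvSp (2 * r)
  if 2 * r = n - 1 then left ++ ['X']
  else left ++ ['X'] ++ pvSp (2 * n - 3 - 4 * r) ++ ['X']

def mark_spot_alt (n : Int) : String :=
  if PySem.Int.mod n 2 ≠ 1 ∨ n < 1 then "?"
  else
    let top := (PySem.List.pyRange 0 (PySem.Int.floordiv n 2 + 1) 1).map (pvRow n)
    -- top[:-1] is PySem.List.slice top none (some (-1)); list(reversed(..)) is .reverse
    let rows := top ++ (PySem.List.slice top none (some (-1))).reverse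
    String.mk (PySem.Chars.join [] (rows.map (· ++ ['\n'])))

-- ===== PRECONDITION & SPEC =====
def Spec_mark_spot (n : Int) (out : String) : Prop := out = mark_spot_alt n
instance (n : Int) (out : String) : Decidable (Spec_mark_spot n out) := by unfold Spec_mark_spot; infer_instance

-- ===== CLAIM (what is proved, stated in full; the proofs are below) =====
def Claim_equal_mark_spot : Prop := ∀ (n : Int), Dom_mark_spot n → Spec_mark_spot n (mark_spot n)

-- ===== LEMMAS AND PROOFS =====

-- the chunk A's loop appends for loop variable i
def pvRowA (mid maxLL i : Int) : List Char :=
  let i' := if mid < i then mid - (i - mid) else i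
  let outsideSpaces := (i' - 1) * 2
  (if i' = mid then pvSp outsideSpaces ++ ['X']
   else pvSp outsideSpaces ++ ['X'] ++ pvSp (maxLL - outsideSpaces * 2 - 2) ++ ['X']) ++ ['\n']

lemma join_nil_eq_flatten (l : List (List Char)) : PySem.Chars.join [] l = l.flatten := by
  show List.intercalate [] l = l.flatten
  unfold List.intercalate
  induction l with
  | nil => rfl
  | cons a t ih => cases t <;> simp_all [List.intersperse]

lemma map_range_rev {α : Type} (K : Nat) (f : Nat → α) :
    ((List.range K).map f).reverse = (List.range K).map (fun j => f (K - 1 - j)) := by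
  induction K generalizing f with
  | zero => rfl
  | succ m ih =>
    have L : ((List.range (m + 1)).map f).reverse = f m :: ((List.range m).map f).reverse := by
      rw [List.range_succ]; simp
    have R : (List.range (m + 1)).map (fun j => f (m + 1 - 1 - j))
        = f m :: (List.range m).map (fun j => f (m - 1 - j)) := by
      rw [List.range_succ_eq_map, List.map_cons, List.map_map]
      simp only [Nat.add_sub_cancel, Nat.sub_zero]
      congr 1
      apply List.map_congr_left
      intro j _
      simp only [Function.comp]
      congr 1
      omega
    rw [L, R, ih]

-- A's fold is the flatten of the per-line chunks
lemma foldA (mid maxLL : Int) (l : List Int) (acc : List Char) :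
    l.foldl (fun acc i =>
      let i' := if mid < i then mid - (i - mid) else i
      let outsideSpaces := (i' - 1) * 2
      let firstPart := pvSp outsideSpaces
      let middlePart := pvSp (maxLL - outsideSpaces * 2 - 2)
      (if i' = mid then acc ++ firstPart ++ ['X']
       else acc ++ firstPart ++ ['X'] ++ middlePart ++ ['X']) ++ ['\n']) acc
    = acc ++ l.flatMap (pvRowA mid maxLL) := by
  have h : (fun (acc : List Char) (i : Int) =>
      let i' := if mid < i then mid - (i - mid) else i
      let outsideSpaces := (i' - 1) * 2
      let firstPart := pvSp outsideSpaces
      let middlePart := pvSp (maxLL - outsideSpaces * 2 - 2)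
      (if i' = mid then acc ++ firstPart ++ ['X']
       else acc ++ firstPart ++ ['X'] ++ middlePart ++ ['X']) ++ ['\n'])
      = fun acc i => acc ++ pvRowA mid maxLL i := by
    funext acc i
    simp only [pvRowA]
    split_ifs <;> simp
  rw [h, PySem.List.foldl_append_eq_flatMap]

-- top half: A's chunk for line i = 1 + j (j ≤ K) is B's row j followed by '\n'
lemma rowA_top (K : Nat) (j : Nat) (hj : j ≤ K) :
    pvRowA ((K : Int) + 1) (2 * (2 * (K : Int) + 1) - 1) (1 + (j : Int)) =
      pvRow (2 * (K : Int) + 1) (j : Int) ++ ['\n'] := by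
  simp only [pvRowA, pvRow]
  split_ifs <;> try (exfalso; omega)
  all_goals rw [show (1 + (j : Int) - 1) * 2 = 2 * (j : Int) from by ring]
  rw [show 2 * (2 * (K : Int) + 1) - 1 - 2 * (j : Int) * 2 - 2
        = 2 * (2 * (K : Int) + 1) - 3 - 4 * (j : Int) from by ring]

-- bottom half: A's chunk for line K + 2 + j (j < K) is B's row K - 1 - j followed by '\n'
lemma rowA_bot (K : Nat) (j : Nat) (hj : j < K) :
    pvRowA ((K : Int) + 1) (2 * (2 * (K : Int) + 1) - 1) ((K : Int) + 2 + (j : Int)) =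
      pvRow (2 * (K : Int) + 1) (((K - 1 - j : Nat) : Int)) ++ ['\n'] := by
  simp only [pvRowA, pvRow]
  split_ifs <;> try (exfalso; omega)
  rw [show ((K : Int) + 1 - ((K : Int) + 2 + (j : Int) - ((K : Int) + 1)) - 1) * 2
        = 2 * (((K - 1 - j : Nat) : Int)) from by omega,
      show 2 * (2 * (K : Int) + 1) - 1 - 2 * (((K - 1 - j : Nat) : Int)) * 2 - 2
        = 2 * (2 * (K : Int) + 1) - 3 - 4 * (((K - 1 - j : Nat) : Int)) from by omega]

lemma pv_dropLast_map_range {α : Type} (K : Nat) (f : Nat → α) :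
    ((List.range (K + 1)).map f).dropLast = (List.range K).map f := by
  rw [List.range_succ, List.map_append, List.map_singleton, List.dropLast_concat]

-- ===== VERDICT (by name: the statement is the Claim_ definition above) =====
set_option maxRecDepth 8192 in
theorem mark_spot_spec : Claim_equal_mark_spot := by
  intro n _
  unfold Spec_mark_spot mark_spot mark_spot_alt
  by_cases hg : PySem.Int.mod n 2 ≠ 1 ∨ n < 1
  · simp only [hg, if_pos]
  · rw [if_neg hg, if_neg hg]
    push_neg at hg
    obtain ⟨h1, h2⟩ := hg
    have hm2 : n % 2 = 1 := by rwa [PySem.Int.mod_eq_emod_of_pos (by norm_num)] at h1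
    obtain ⟨K, hK⟩ : ∃ K : Nat, n = 2 * (K : Int) + 1 := ⟨(n / 2).toNat, by omega⟩
    have hfd : PySem.Int.floordiv n 2 = (K : Int) := by
      rw [PySem.Int.floordiv_eq_ediv_of_pos (by norm_num)]; omega
    subst hK
    rw [hfd]
    apply congrArg String.mk
    rw [foldA, List.nil_append, join_nil_eq_flatten, PySem.List.slice_to_neg_one]
    -- split A's range at the line after the middle
    rw [PySem.List.pyRange_one_append 1 ((K : Int) + 2) (2 * (K : Int) + 1 + 1) (by omega) (by omega),
      List.flatMap_append]
    -- all three ranges as List.range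
    rw [PySem.List.pyRange_one 1 ((K : Int) + 2),
      PySem.List.pyRange_one ((K : Int) + 2) (2 * (K : Int) + 1 + 1),
      PySem.List.pyRange_one 0 ((K : Int) + 1)]
    have hK1 : ((K : Int) + 2 - 1).toNat = K + 1 := by omega
    have hK2 : (2 * (K : Int) + 1 + 1 - ((K : Int) + 2)).toNat = K := by omega
    have hK3 : ((K : Int) + 1 - 0).toNat = K + 1 := by omega
    rw [hK1, hK2, hK3, List.flatMap_map, List.flatMap_map]
    -- B's rows, distributed
    rw [List.map_append, List.flatten_append]
    refine congrArg₂ (· ++ ·) ?_ ?_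
    -- top halves
    · rw [List.flatMap_def, List.map_map, List.map_map]
      refine congrArg List.flatten ?_
      apply List.map_congr_left
      intro j hj
      rw [List.mem_range] at hj
      have := rowA_top K j (by omega)
      simpa [Function.comp] using this
    -- bottom halves
    · rw [List.flatMap_def, List.map_map, pv_dropLast_map_range, map_range_rev, List.map_map]
      refine congrArg List.flatten ?_
      apply List.map_congr_left
      intro j hj
      rw [List.mem_range] at hj
      have := rowA_bot K j hj
      simpa [Function.comp] using this
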